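-- pv_equiv track=rewrite | github.com/reza0310/NSI | La beauté.py | prios
-- ===== SOURCE A (Python) =====
-- def prios(exp):
--     res=[]
--     ops = ["+","-","/","*"]
--     for i in range(len(exp)):
--         if exp[i] in ops:
--             res.append((exp[i],i))
--     for i in range(len(res)):
--         j=i
--         while j>=1 and ops.index(res[j][0]) < ops.index(res[j-1][0]):
--             res[j],res[j-1] = res[j-1],res[j]
--             j-=1
--     return res
-- ===== SOURCE B (Python) =====
-- def prios(exp):
--     ops = ["+", "-", "/", "*"]
--     buckets = ([], [], [], [])
--     for i, ch in enumerate(exp):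
--         if ch in ops:
--             buckets[ops.index(ch)].append((ch, i))
--     return buckets[0] + buckets[1] + buckets[2] + buckets[3]
-- ===== Notes on version B (the rewrite author's own statement) =====
-- stated objective: alternative
-- what changed: Replaces the pairwise swap-based insertion sort over the collected (op,index) pairs by a single bucket/distribution pass: each operator is appended to one of four priority buckets during the scan and the buckets are concatenated in ops order, which preserves A's stable order exactly.
import Mathlib
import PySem

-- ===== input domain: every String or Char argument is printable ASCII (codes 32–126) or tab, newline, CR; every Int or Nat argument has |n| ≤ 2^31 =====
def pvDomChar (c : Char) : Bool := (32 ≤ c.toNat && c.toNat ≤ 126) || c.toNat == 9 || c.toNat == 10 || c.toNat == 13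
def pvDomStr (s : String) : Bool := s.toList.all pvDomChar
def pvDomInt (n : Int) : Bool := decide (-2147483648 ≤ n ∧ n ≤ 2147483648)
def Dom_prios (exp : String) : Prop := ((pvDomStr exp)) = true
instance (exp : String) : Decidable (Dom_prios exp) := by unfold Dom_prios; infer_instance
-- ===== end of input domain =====

-- B replaces A's swap-based insertion sort of the collected (op,index) pairs by a single
-- bucket/distribution pass: four priority buckets filled in scan order and concatenated in ops order.


-- ops = ["+","-","/","*"]  (the literal constant of both programs)
def pvOps : List String := ["+", "-", "/", "*"]

-- ===== PORT A =====
-- ops.index(x); exact at every call site: A only calls it with x ∈ pvOps, so the .getD 0 default is never used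
def pvIdxOf (x : String) : Nat := (PySem.List.index? pvOps x).getD 0
-- res[j]; exact at every call site: A only reads indices that are in range, so the default is never used
def pvEntry (res : List (String × Int)) (j : Int) : String × Int := PySem.List.pyGetD res j ("", 0)

-- the inner `while j>=1 and ops.index(res[j][0]) < ops.index(res[j-1][0])` loop with the tuple swap
def pvInner (res : List (String × Int)) (j : Int) : List (String × Int) :=
  if h : 1 ≤ j ∧ pvIdxOf (pvEntry res j).1 < pvIdxOf (pvEntry res (j - 1)).1 then
    pvInner (PySem.List.pySetD (PySem.List.pySetD res j (pvEntry res (j - 1))) (j - 1) (pvEntry res j)) (j - 1)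
  else res
termination_by j.toNat
decreasing_by omega

-- first loop: collect (exp[i], i) for operator characters
def pvPhase1 (exp : String) : List (String × Int) :=
  (PySem.List.pyRange 0 (PySem.Str.len exp : Int) 1).foldl
    (fun r i =>
      match PySem.Str.pyGet? exp i with
      | some c => if String.ofList [c] ∈ pvOps then r ++ [(String.ofList [c], i)] else r
      | none => r) []

-- second loop: for i in range(len(res)): run the inner while loop from j = i
def pvOuter (res : List (String × Int)) : List (String × Int) :=
  (PySem.List.pyRange 0 (res.length : Int) 1).foldl (fun r i => pvInner r i) res

def prios (exp : String) : List (String × Int) := pvOuter (pvPhase1 exp)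

-- ===== PORT B =====
-- one enumerate pass: `if ch in ops: buckets[ops.index(ch)].append((ch, i))` (index? = none ⟺ ch not in ops)
def pvStepB (bs : List (String × Int) × List (String × Int) × List (String × Int) × List (String × Int))
    (p : Int × Char) :
    List (String × Int) × List (String × Int) × List (String × Int) × List (String × Int) :=
  let s := String.ofList [p.2]
  match PySem.List.index? pvOps s with
  | some 0 => (bs.1 ++ [(s, p.1)], bs.2.1, bs.2.2.1, bs.2.2.2)
  | some 1 => (bs.1, bs.2.1 ++ [(s, p.1)], bs.2.2.1, bs.2.2.2)
  | some 2 => (bs.1, bs.2.1, bs.2.2.1 ++ [(s, p.1)], bs.2.2.2)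
  | some 3 => (bs.1, bs.2.1, bs.2.2.1, bs.2.2.2 ++ [(s, p.1)])
  | _ => bs

def prios_alt (exp : String) : List (String × Int) :=
  let bs := (PySem.List.enumerate exp.toList 0).foldl pvStepB ([], [], [], [])
  bs.1 ++ bs.2.1 ++ bs.2.2.1 ++ bs.2.2.2

-- ===== PRECONDITION & SPEC =====
def Spec_prios (exp : String) (out : List (String × Int)) : Prop := out = prios_alt exp
instance (exp : String) (out : List (String × Int)) : Decidable (Spec_prios exp out) := by unfold Spec_prios; infer_instance

-- ===== CLAIM (what is proved, stated in full; the proofs are below) =====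
def Claim_equal_prios : Prop := ∀ (exp : String), Dom_prios exp → Spec_prios exp (prios exp)

-- ===== LEMMAS AND PROOFS =====

-- the selected (op-string, index) pairs of an enumerated character list, in scan order
def selL (l : List (Int × Char)) : List (String × Int) :=
  (l.filter (fun p => decide (String.ofList [p.2] ∈ pvOps))).map (fun p => (String.ofList [p.2], p.1))

-- the four priority buckets, concatenated in ops order
def Fb (p : List (String × Int)) : List (String × Int) :=
  p.filter (fun y => y.1 == "+") ++ p.filter (fun y => y.1 == "-") ++
  p.filter (fun y => y.1 == "/") ++ p.filter (fun y => y.1 == "*")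

-- functional form of A's inner while loop: bubble x left through u, scanning u from the right
def insRev : List (String × Int) → (String × Int) → List (String × Int)
  | [], x => [x]
  | b :: r, x => if pvIdxOf x.1 < pvIdxOf b.1 then b :: insRev r x else x :: b :: r

def insR (u : List (String × Int)) (x : String × Int) : List (String × Int) := (insRev u.reverse x).reverse

lemma entry_mid (u v : List (String × Int)) (b x : String × Int) :
    pvEntry (u ++ b :: x :: v) ((u.length : Int) + 1) = x := by
  have h : ((u.length : Int) + 1) = ((u.length + 1 : Nat) : Int) := by push_cast; ring
  rw [pvEntry, h, PySem.List.pyGetD_natCast]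
  simp [List.getD]

lemma entry_left (u v : List (String × Int)) (b x : String × Int) :
    pvEntry (u ++ b :: x :: v) (u.length : Int) = b := by
  rw [pvEntry, PySem.List.pyGetD_natCast]
  simp [List.getD]

lemma swap_sets (u v : List (String × Int)) (b x : String × Int) :
    PySem.List.pySetD (PySem.List.pySetD (u ++ b :: x :: v) ((u.length : Int) + 1) b)
      (u.length : Int) x = u ++ x :: b :: v := by
  have h : ((u.length : Int) + 1) = ((u.length + 1 : Nat) : Int) := by push_cast; ring
  rw [h, PySem.List.pySetD_natCast, PySem.List.pySetD_natCast]
  induction u with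
  | nil => simp
  | cons a t ih => simpa using ih

lemma pvInner_spec (u : List (String × Int)) (x : String × Int) (v : List (String × Int)) :
    pvInner (u ++ x :: v) (u.length : Int) = insR u x ++ v := by
  induction u using List.reverseRecOn generalizing v with
  | nil =>
      rw [pvInner]
      simp [insR, insRev]
  | append_singleton u' b ih =>
      have hre : u' ++ [b] ++ x :: v = u' ++ b :: x :: v := by simp
      have hlen : ((u' ++ [b]).length : Int) = (u'.length : Int) + 1 := by simp
      rw [hre, hlen, pvInner]
      by_cases hc : pvIdxOf x.1 < pvIdxOf b.1
      · rw [dif_pos]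
        · have h1 : (u'.length : Int) + 1 - 1 = (u'.length : Int) := by ring
          rw [h1, entry_mid, entry_left, swap_sets, ih]
          have : insR (u' ++ [b]) x = insR u' x ++ [b] := by
            simp [insR, insRev, hc]
          rw [this]; simp
        · refine ⟨by omega, ?_⟩
          have h1 : (u'.length : Int) + 1 - 1 = (u'.length : Int) := by ring
          rw [h1, entry_mid, entry_left]; exact hc
      · rw [dif_neg]
        · have : insR (u' ++ [b]) x = u' ++ [b, x] := by
            simp [insR, insRev, hc]
          rw [this]; simp
        · have h1 : (u'.length : Int) + 1 - 1 = (u'.length : Int) := by ring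
          rw [h1, entry_mid, entry_left]
          exact fun hh => hc hh.2

lemma length_Fb (p : List (String × Int)) (hp : ∀ y ∈ p, y.1 ∈ pvOps) :
    (Fb p).length = p.length := by
  induction p with
  | nil => rfl
  | cons a t ih =>
      have ha := hp a (by simp)
      have ht : ∀ y ∈ t, y.1 ∈ pvOps := fun y hy => hp y (List.mem_cons_of_mem _ hy)
      have ih' := ih ht
      simp only [Fb, List.length_append] at ih' ⊢
      rcases (by simpa [pvOps] using ha :
        a.1 = "+" ∨ a.1 = "-" ∨ a.1 = "/" ∨ a.1 = "*") with h | h | h | h <;>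
        simp [List.filter_cons, h] <;> omega

lemma insRev_append_high (r1 r2 : List (String × Int)) (x : String × Int)
    (h : ∀ b ∈ r1, pvIdxOf x.1 < pvIdxOf b.1) :
    insRev (r1 ++ r2) x = r1 ++ insRev r2 x := by
  induction r1 with
  | nil => simp
  | cons a t ih =>
      have ha := h a (by simp)
      simp only [List.cons_append, insRev, if_pos ha]
      rw [ih (fun b hb => h b (by simp [hb]))]

lemma insRev_low (r : List (String × Int)) (x : String × Int)
    (h : ∀ b ∈ r, ¬ pvIdxOf x.1 < pvIdxOf b.1) :
    insRev r x = x :: r := by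
  cases r with
  | nil => rfl
  | cons a t => simp only [insRev, if_neg (h a (by simp))]

lemma mem_filter_op (p : List (String × Int)) (s : String) (b : String × Int)
    (hb : b ∈ p.filter (fun y => y.1 == s)) : b.1 = s := by
  simpa using (List.mem_filter.mp hb).2

lemma insRev_split (hi lo : List (String × Int)) (x : String × Int)
    (hhi : ∀ b ∈ hi, pvIdxOf x.1 < pvIdxOf b.1) (hlo : ∀ b ∈ lo, ¬ pvIdxOf x.1 < pvIdxOf b.1) :
    insRev (hi ++ lo) x = hi ++ x :: lo := by
  rw [insRev_append_high _ _ _ hhi, insRev_low _ _ hlo]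

lemma insR_Fb (p : List (String × Int)) (x : String × Int) (hx : x.1 ∈ pvOps) :
    insR (Fb p) x = Fb (p ++ [x]) := by
  have hmem : ∀ (s : String) (b : String × Int), b ∈ (p.filter (fun y => y.1 == s)).reverse → b.1 = s :=
    fun s b hb => mem_filter_op p s b (List.mem_reverse.mp hb)
  rcases (by simpa [pvOps] using hx :
      x.1 = "+" ∨ x.1 = "-" ∨ x.1 = "/" ∨ x.1 = "*") with h | h | h | h
  · have hrw : (Fb p).reverse =
        ((p.filter (fun y => y.1 == "*")).reverse ++ (p.filter (fun y => y.1 == "/")).reverse ++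
         (p.filter (fun y => y.1 == "-")).reverse) ++ (p.filter (fun y => y.1 == "+")).reverse := by
      simp [Fb]
    rw [insR, hrw, insRev_split]
    · simp [Fb, List.filter_append, List.filter_cons, h]
    · intro b hb
      rcases List.mem_append.mp hb with hb' | hb'
      · rcases List.mem_append.mp hb' with hb'' | hb''
        · rw [h, hmem "*" b hb'']; decide
        · rw [h, hmem "/" b hb'']; decide
      · rw [h, hmem "-" b hb']; decide
    · intro b hb; rw [h, hmem "+" b hb]; decide
  · have hrw : (Fb p).reverse =
        ((p.filter (fun y => y.1 == "*")).reverse ++ (p.filter (fun y => y.1 == "/")).reverse) ++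
         ((p.filter (fun y => y.1 == "-")).reverse ++ (p.filter (fun y => y.1 == "+")).reverse) := by
      simp [Fb]
    rw [insR, hrw, insRev_split]
    · simp [Fb, List.filter_append, List.filter_cons, h]
    · intro b hb
      rcases List.mem_append.mp hb with hb' | hb'
      · rw [h, hmem "*" b hb']; decide
      · rw [h, hmem "/" b hb']; decide
    · intro b hb
      rcases List.mem_append.mp hb with hb' | hb'
      · rw [h, hmem "-" b hb']; decide
      · rw [h, hmem "+" b hb']; decide
  · have hrw : (Fb p).reverse =
        (p.filter (fun y => y.1 == "*")).reverse ++
         (((p.filter (fun y => y.1 == "/")).reverse ++ (p.filter (fun y => y.1 == "-")).reverse) ++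
          (p.filter (fun y => y.1 == "+")).reverse) := by
      simp [Fb]
    rw [insR, hrw, insRev_split]
    · simp [Fb, List.filter_append, List.filter_cons, h]
    · intro b hb; rw [h, hmem "*" b hb]; decide
    · intro b hb
      rcases List.mem_append.mp hb with hb' | hb'
      · rcases List.mem_append.mp hb' with hb'' | hb''
        · rw [h, hmem "/" b hb'']; decide
        · rw [h, hmem "-" b hb'']; decide
      · rw [h, hmem "+" b hb']; decide
  · have hrw : (Fb p).reverse =
        [] ++ ((p.filter (fun y => y.1 == "*")).reverse ++
         (((p.filter (fun y => y.1 == "/")).reverse ++ (p.filter (fun y => y.1 == "-")).reverse) ++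
          (p.filter (fun y => y.1 == "+")).reverse)) := by
      simp [Fb]
    rw [insR, hrw, insRev_split]
    · simp [Fb, List.filter_append, List.filter_cons, h]
    · intro b hb; simp at hb
    · intro b hb
      rcases List.mem_append.mp hb with hb' | hb'
      · rw [h, hmem "*" b hb']; decide
      · rcases List.mem_append.mp hb' with hb'' | hb''
        · rcases List.mem_append.mp hb'' with h3 | h3
          · rw [h, hmem "/" b h3]; decide
          · rw [h, hmem "-" b h3]; decide
        · rw [h, hmem "+" b hb'']; decide

lemma outer_fold (rest : List (String × Int)) :
    ∀ (p : List (String × Int)), (∀ y ∈ p, y.1 ∈ pvOps) → (∀ y ∈ rest, y.1 ∈ pvOps) →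
    List.foldl (fun r (k : Nat) => pvInner r (k : Int)) (Fb p ++ rest)
      (List.range' p.length rest.length) = Fb (p ++ rest) := by
  induction rest with
  | nil => intro p _ _; simp
  | cons x t ih =>
      intro p hp hr
      have hx : x.1 ∈ pvOps := hr x (by simp)
      have ht : ∀ y ∈ t, y.1 ∈ pvOps := fun y hy => hr y (List.mem_cons_of_mem _ hy)
      simp only [List.length_cons, List.range'_succ, List.foldl_cons]
      have h1 : pvInner (Fb p ++ x :: t) ((p.length : Nat) : Int) = Fb (p ++ [x]) ++ t := by
        rw [show ((p.length : Nat) : Int) = ((Fb p).length : Int) by rw [length_Fb p hp],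
          pvInner_spec, insR_Fb p x hx]
      rw [h1]
      have hp' : ∀ y ∈ p ++ [x], y.1 ∈ pvOps := by
        intro y hy; rcases List.mem_append.mp hy with h | h
        · exact hp y h
        · simp at h; subst h; exact hx
      have := ih (p ++ [x]) hp' ht
      simpa using this

lemma mem_selL (l : List (Int × Char)) : ∀ y ∈ selL l, y.1 ∈ pvOps := by
  intro y hy
  simp only [selL, List.mem_map, List.mem_filter] at hy
  obtain ⟨p, ⟨_, hp⟩, rfl⟩ := hy
  simpa using hp

lemma selL_append (l1 l2 : List (Int × Char)) : selL (l1 ++ l2) = selL l1 ++ selL l2 := by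
  simp [selL]

lemma phase1_list (cs : List Char) :
    (List.range cs.length).foldl
      (fun r (k : Nat) =>
        match cs[k]? with
        | some c => if String.ofList [c] ∈ pvOps then r ++ [(String.ofList [c], (k : Int))] else r
        | none => r) []
    = selL (PySem.List.enumerate cs 0) := by
  induction cs using List.reverseRecOn with
  | nil => simp [selL]
  | append_singleton cs' c ih =>
      rw [List.length_append, List.length_cons, List.length_nil, Nat.zero_add, List.range_succ,
        List.foldl_append]
      have hcong : (List.range cs'.length).foldl
          (fun r (k : Nat) =>
            match (cs' ++ [c])[k]? with
            | some c => if String.ofList [c] ∈ pvOps then r ++ [(String.ofList [c], (k : Int))] else r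
            | none => r) []
          = selL (PySem.List.enumerate cs' 0) := by
        rw [← ih]
        apply PySem.List.foldl_congr_mem
        intro acc k hk
        rw [List.getElem?_append_left (List.mem_range.mp hk)]
      rw [hcong]
      have hlast : (cs' ++ [c])[cs'.length]? = some c := by
        simp
      rw [List.foldl_cons, List.foldl_nil, hlast]
      have henum : PySem.List.enumerate (cs' ++ [c]) 0 =
          PySem.List.enumerate cs' 0 ++ [((cs'.length : Int), c)] := by
        rw [PySem.List.enumerate_append]
        simp [PySem.List.enumerate_cons, PySem.List.enumerate_nil]
      rw [henum, selL_append]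
      by_cases hm : String.ofList [c] ∈ pvOps
      · simp [selL, hm]
      · simp [selL, hm]

lemma phase1_A (exp : String) : pvPhase1 exp = selL (PySem.List.enumerate exp.toList 0) := by
  rw [← phase1_list exp.toList, pvPhase1, PySem.List.pyRange_one, List.foldl_map]
  have hn : (((PySem.Str.len exp : Int) - 0).toNat) = exp.toList.length := by
    simp [PySem.Str.len_eq]
  rw [hn]
  apply PySem.List.foldl_congr_mem
  intro acc k _
  simp

lemma outer_A (L : List (String × Int)) (hL : ∀ y ∈ L, y.1 ∈ pvOps) : pvOuter L = Fb L := by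
  rw [pvOuter, PySem.List.pyRange_one, List.foldl_map]
  have hn : ((((L.length : Nat) : Int) - 0).toNat) = L.length := by simp
  rw [hn]
  have hc : List.foldl (fun (r : List (String × Int)) (k : Nat) => pvInner r ((0 : Int) + ↑k)) L (List.range L.length)
      = List.foldl (fun (r : List (String × Int)) (k : Nat) => pvInner r (k : Int)) L (List.range L.length) := by
    apply PySem.List.foldl_congr_mem
    intro acc k _
    simp
  rw [hc, List.range_eq_range']
  have := outer_fold L [] (by simp) hL
  simpa using this

lemma alt_fold (l : List (Int × Char)) :
    ∀ b0 b1 b2 b3 : List (String × Int),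
    l.foldl pvStepB (b0, b1, b2, b3) =
      (b0 ++ (selL l).filter (fun y => y.1 == "+"), b1 ++ (selL l).filter (fun y => y.1 == "-"),
       b2 ++ (selL l).filter (fun y => y.1 == "/"), b3 ++ (selL l).filter (fun y => y.1 == "*")) := by
  induction l with
  | nil => intro b0 b1 b2 b3; simp [selL]
  | cons q t ih =>
      intro b0 b1 b2 b3
      obtain ⟨i, c⟩ := q
      rw [List.foldl_cons]
      by_cases hm : String.ofList [c] ∈ pvOps
      · have hsel : selL ((i, c) :: t) = (String.ofList [c], i) :: selL t := by
          simp [selL, hm]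
        rcases (by simpa [pvOps] using hm :
            String.ofList [c] = "+" ∨ String.ofList [c] = "-" ∨
            String.ofList [c] = "/" ∨ String.ofList [c] = "*") with h | h | h | h
        · have hstep : pvStepB (b0, b1, b2, b3) (i, c) = (b0 ++ [("+", i)], b1, b2, b3) := by
            simp only [pvStepB, h]
            rw [show PySem.List.index? pvOps "+" = some 0 from by decide]
          rw [hsel, h, hstep, ih]
          simp [List.filter_cons]
        · have hstep : pvStepB (b0, b1, b2, b3) (i, c) = (b0, b1 ++ [("-", i)], b2, b3) := by
            simp only [pvStepB, h]
            rw [show PySem.List.index? pvOps "-" = some 1 from by decide]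
          rw [hsel, h, hstep, ih]
          simp [List.filter_cons]
        · have hstep : pvStepB (b0, b1, b2, b3) (i, c) = (b0, b1, b2 ++ [("/", i)], b3) := by
            simp only [pvStepB, h]
            rw [show PySem.List.index? pvOps "/" = some 2 from by decide]
          rw [hsel, h, hstep, ih]
          simp [List.filter_cons]
        · have hstep : pvStepB (b0, b1, b2, b3) (i, c) = (b0, b1, b2, b3 ++ [("*", i)]) := by
            simp only [pvStepB, h]
            rw [show PySem.List.index? pvOps "*" = some 3 from by decide]
          rw [hsel, h, hstep, ih]
          simp [List.filter_cons]
      · have hsel : selL ((i, c) :: t) = selL t := by simp [selL, hm]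
        have hidx : PySem.List.index? pvOps (String.ofList [c]) = none :=
          (PySem.List.index?_eq_none_iff pvOps _).mpr hm
        rw [hsel]
        have hstep : pvStepB (b0, b1, b2, b3) (i, c) = (b0, b1, b2, b3) := by
          simp only [pvStepB, hidx]
        rw [hstep, ih]

lemma alt_eq (exp : String) : prios_alt exp = Fb (selL (PySem.List.enumerate exp.toList 0)) := by
  rw [prios_alt, alt_fold]
  simp [Fb]

-- ===== VERDICT (by name: the statement is the Claim_ definition above) =====
theorem prios_spec : Claim_equal_prios := by
  intro exp _
  unfold Spec_prios
  rw [prios, phase1_A, outer_A _ (mem_selL _), alt_eq]
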